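-- pv_equiv track=rewrite | github.com/malkro7/aoc2025 | aoc9ab.py | solve_part_b
-- ===== SOURCE A (Python) =====
-- import itertools
-- from typing import List, Tuple
--
-- Coord = Tuple[int, int]
--
-- def solve_part_b(points: List[Coord]) -> int:
--     """Part B: Find largest rectangle whose every tile is red or green.
--
--     The red tiles form a closed loop; consecutive points (and last->first)
--     are joined by axis-aligned edges.
--     A rectangle is valid if no edge of this loop passes through its interior.
--     Touching the border is allowed.
--     """
--
--     # Close the loop: edges are between loop[k] and loop[k+1]
--     loop = points + [points[0]]
--
--     max_area = 0
--
--     # Try all pairs of red tiles as opposite corners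
--     for (x1, y1), (x2, y2) in itertools.combinations(points, 2):
--         # Compute inclusive bounding box of candidate rectangle
--         bx1, bx2 = min(x1, x2), max(x1, x2)
--         by1, by2 = min(y1, y2), max(y1, y2)
--
--         # Check all polygon edges for intersection with the rectangle *interior*
--         for (lx1, ly1), (lx2, ly2) in itertools.pairwise(loop):
--             # Edge is axis-aligned per problem statement.
--             #
--             # This condition checks if the segment is completely:
--             #   - to the left of the rectangle,
--             #   - to the right of the rectangle,
--             #   - above the rectangle, or
--             #   - below the rectangle.
--             #
--             # If it is NOT completely outside in one of these ways,
--             # then it intersects the rectangle.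
--             #
--             # Note the use of <=, which ensures:
--             #   - segments that lie exactly on the rectangle border
--             #     are considered "outside" for this test, i.e. allowed.
--             if not (
--                 max(lx1, lx2) <= bx1 or  # entirely left
--                 bx2 <= min(lx1, lx2) or  # entirely right
--                 max(ly1, ly2) <= by1 or  # entirely above
--                 by2 <= min(ly1, ly2)     # entirely below
--             ):
--                 # This edge cuts through the rectangle interior -> invalid
--                 break
--
--         else:
--             # No edges cut the interior -> rectangle is fully red/green
--             area = (bx2 - bx1 + 1) * (by2 - by1 + 1)
--             if area > max_area:
--                 max_area = area
--
--     return max_area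
-- ===== SOURCE B (Python) =====
-- import itertools
-- from typing import List, Tuple
--
-- Coord = Tuple[int, int]
--
-- def solve_part_b(points: List[Coord]) -> int:
--     """Largest-area first: enumerate candidate rectangles, sort them by area
--     descending, and return the area of the first one no loop edge cuts."""
--     loop = points + points[:1]
--     edges = list(zip(loop, loop[1:]))
--
--     cands = []
--     for (x1, y1), (x2, y2) in itertools.combinations(points, 2):
--         bx1, bx2 = min(x1, x2), max(x1, x2)
--         by1, by2 = min(y1, y2), max(y1, y2)
--         cands.append(((bx2 - bx1 + 1) * (by2 - by1 + 1), bx1, by1, bx2, by2))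
--     cands.sort(key=lambda c: c[0], reverse=True)
--
--     for area, bx1, by1, bx2, by2 in cands:
--         blocked = any(
--             bx1 < max(lx1, lx2) and min(lx1, lx2) < bx2
--             and by1 < max(ly1, ly2) and min(ly1, ly2) < by2
--             for (lx1, ly1), (lx2, ly2) in edges
--         )
--         if not blocked:
--             return area
--     return 0
-- ===== Notes on version B (the rewrite author's own statement) =====
-- stated objective: alternative
-- what changed: B enumerates the candidate rectangles once, sorts them by area descending (stable sort) and returns the area of the first candidate no loop edge cuts, instead of A's running-maximum scan that tests every pair against every edge.
import Mathlib
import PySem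

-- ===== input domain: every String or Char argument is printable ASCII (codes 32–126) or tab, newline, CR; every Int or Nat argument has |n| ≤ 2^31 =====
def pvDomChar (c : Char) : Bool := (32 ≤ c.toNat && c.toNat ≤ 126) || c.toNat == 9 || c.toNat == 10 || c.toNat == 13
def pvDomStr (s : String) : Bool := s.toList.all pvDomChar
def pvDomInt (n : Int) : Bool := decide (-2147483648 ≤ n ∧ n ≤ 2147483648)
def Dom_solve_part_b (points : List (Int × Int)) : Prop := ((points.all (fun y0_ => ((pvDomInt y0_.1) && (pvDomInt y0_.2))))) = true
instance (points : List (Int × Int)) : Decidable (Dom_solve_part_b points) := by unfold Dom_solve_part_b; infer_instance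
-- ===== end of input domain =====

-- B sorts the candidate rectangles by area descending and returns the first uncut one,
-- instead of A's running-maximum scan over all pairs; return values agree on nonempty input.

-- itertools.combinations(xs, 2), shared library helper of both ports
def combos2 {α : Type} (xs : List α) : List (α × α) :=
  match xs with
  | [] => []
  | x :: t => t.map (fun y => (x, y)) ++ combos2 t

-- ===== PORT A =====
def solve_part_b (points : List (Int × Int)) : Int :=
  match points with
  | [] => 0  -- Python raises IndexError on points[0]; excluded by Pre_
  | p0 :: _ =>
    let loop := points ++ [p0]
    let edges := loop.zip loop.tail   -- itertools.pairwise(loop)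
    (combos2 points).foldl (fun max_area pr =>
      let bx1 := min pr.1.1 pr.2.1
      let bx2 := max pr.1.1 pr.2.1
      let by1 := min pr.1.2 pr.2.2
      let by2 := max pr.1.2 pr.2.2
      -- inner for/else: 'break' hit iff some edge fails the outside test
      if edges.any (fun e =>
          ! (decide (max e.1.1 e.2.1 ≤ bx1) || decide (bx2 ≤ min e.1.1 e.2.1) ||
             decide (max e.1.2 e.2.2 ≤ by1) || decide (by2 ≤ min e.1.2 e.2.2))) then
        max_area
      else
        let area := (bx2 - bx1 + 1) * (by2 - by1 + 1)
        if area > max_area then area else max_area) 0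

-- ===== PORT B =====
def solve_part_b_alt (points : List (Int × Int)) : Int :=
  let loop := points ++ points.take 1       -- points + points[:1]
  let edges := loop.zip (loop.drop 1)       -- zip(loop, loop[1:])
  let cands := (combos2 points).map (fun pr =>
    let bx1 := min pr.1.1 pr.2.1
    let bx2 := max pr.1.1 pr.2.1
    let by1 := min pr.1.2 pr.2.2
    let by2 := max pr.1.2 pr.2.2
    ((bx2 - bx1 + 1) * (by2 - by1 + 1), bx1, by1, bx2, by2))
  let sortedC := PySem.List.sorted cands (fun c => c.1) true   -- sort by area, reverse=True
  match sortedC.find? (fun c =>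
      ! edges.any (fun e =>
          decide (c.2.1 < max e.1.1 e.2.1) && decide (min e.1.1 e.2.1 < c.2.2.2.1) &&
          decide (c.2.2.1 < max e.1.2 e.2.2) && decide (min e.1.2 e.2.2 < c.2.2.2.2))) with
  | some c => c.1
  | none => 0

-- ===== PRECONDITION & SPEC =====
-- Pre_ excludes only the empty list, on which Python A raises IndexError at points[0].
def Pre_solve_part_b (points : List (Int × Int)) : Prop := points ≠ []
instance (points : List (Int × Int)) : Decidable (Pre_solve_part_b points) := by unfold Pre_solve_part_b; infer_instance
def pvWitness_solve_part_b : (List (Int × Int)) := [(0, 0), (3, 0), (3, 2), (0, 2)]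

def Spec_solve_part_b (points : List (Int × Int)) (out : Int) : Prop := out = solve_part_b_alt points
instance (points : List (Int × Int)) (out : Int) : Decidable (Spec_solve_part_b points out) := by unfold Spec_solve_part_b; infer_instance

-- ===== CLAIM (what is proved, stated in full; the proofs are below) =====
def Claim_equal_solve_part_b : Prop := ∀ (points : List (Int × Int)), Dom_solve_part_b points → Pre_solve_part_b points → Spec_solve_part_b points (solve_part_b points)

-- ===== LEMMAS AND PROOFS =====

theorem foldl_max_fixed (l : List Int) (b : Int) (h : ∀ x ∈ l, x ≤ b) : l.foldl max b = b := by
  induction l with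
  | nil => rfl
  | cons a t ih =>
    have ha : a ≤ b := h a (by simp)
    have : max b a = b := by omega
    simp only [List.foldl_cons, this]
    exact ih (fun x hx => h x (by simp [hx]))

theorem foldA {α : Type} (bl : α → Bool) (f : α → Int) (l : List α) (m : Int) :
    l.foldl (fun m a => if bl a then m else (if f a > m then f a else m)) m
    = ((l.filter (fun a => !bl a)).map f).foldl max m := by
  induction l generalizing m with
  | nil => rfl
  | cons a t ih =>
    cases hbl : bl a with
    | true => simp [hbl, ih]
    | false =>
      have : (if f a > m then f a else m) = max m (f a) := by omega
      simp [hbl, ih, this]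

theorem find_desc {α : Type} (k : α → Int) (q : α → Bool) :
    ∀ (s : List α), s.Pairwise (fun a b => k b ≤ k a) → (∀ x ∈ s, 0 ≤ k x) →
    (s.find? q).elim 0 k = ((s.filter q).map k).foldl max 0 := by
  intro s
  induction s with
  | nil => intro _ _; rfl
  | cons a t ih =>
    intro hp hnn
    have hall : ∀ b ∈ t, k b ≤ k a := (List.pairwise_cons.mp hp).1
    cases hq : q a with
    | true =>
      rw [List.find?_cons_of_pos hq]
      simp only [Option.elim, List.filter_cons, hq, if_pos, List.map_cons, List.foldl_cons]
      have h0 : max 0 (k a) = k a := by have := hnn a (by simp); omega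
      rw [h0]
      exact (foldl_max_fixed _ _ (by
        intro x hx
        simp only [List.mem_map, List.mem_filter] at hx
        obtain ⟨b, hb, rfl⟩ := hx
        exact hall b hb.1)).symm
    | false =>
      rw [List.find?_cons_of_neg (by simp [hq])]
      simp only [List.filter_cons, hq]
      exact ih (List.pairwise_cons.mp hp).2 (fun x hx => hnn x (by simp [hx]))

theorem core (edges l : List ((Int × Int) × (Int × Int))) :
    List.foldl
      (fun max_area pr =>
        if (edges.any fun e =>
                !(decide (max e.1.1 e.2.1 ≤ min pr.1.1 pr.2.1) || decide (max pr.1.1 pr.2.1 ≤ min e.1.1 e.2.1) ||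
                      decide (max e.1.2 e.2.2 ≤ min pr.1.2 pr.2.2) ||
                    decide (max pr.1.2 pr.2.2 ≤ min e.1.2 e.2.2))) =
              true then
          max_area
        else
          if (max pr.1.1 pr.2.1 - min pr.1.1 pr.2.1 + 1) * (max pr.1.2 pr.2.2 - min pr.1.2 pr.2.2 + 1) > max_area then
            (max pr.1.1 pr.2.1 - min pr.1.1 pr.2.1 + 1) * (max pr.1.2 pr.2.2 - min pr.1.2 pr.2.2 + 1)
          else max_area)
      (0 : Int) l =
    match
      List.find?
        (fun c =>
          !edges.any fun e =>
              decide (c.2.1 < max e.1.1 e.2.1) && decide (min e.1.1 e.2.1 < c.2.2.2.1) &&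
                  decide (c.2.2.1 < max e.1.2 e.2.2) &&
                decide (min e.1.2 e.2.2 < c.2.2.2.2))
        (PySem.List.sorted
          (List.map
            (fun pr =>
              ((max pr.1.1 pr.2.1 - min pr.1.1 pr.2.1 + 1) * (max pr.1.2 pr.2.2 - min pr.1.2 pr.2.2 + 1),
                min pr.1.1 pr.2.1, min pr.1.2 pr.2.2, max pr.1.1 pr.2.1, max pr.1.2 pr.2.2))
            l)
          (fun c => c.1) true) with
    | some c => c.1
    | none => (0 : Int) := by
  set mk : (Int × Int) × (Int × Int) → Int × Int × Int × Int × Int := fun pr =>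
    ((max pr.1.1 pr.2.1 - min pr.1.1 pr.2.1 + 1) * (max pr.1.2 pr.2.2 - min pr.1.2 pr.2.2 + 1),
      min pr.1.1 pr.2.1, min pr.1.2 pr.2.2, max pr.1.1 pr.2.1, max pr.1.2 pr.2.2) with hmk
  set q : Int × Int × Int × Int × Int → Bool := fun c =>
    !edges.any fun e =>
        decide (c.2.1 < max e.1.1 e.2.1) && decide (min e.1.1 e.2.1 < c.2.2.2.1) &&
            decide (c.2.2.1 < max e.1.2 e.2.2) &&
          decide (min e.1.2 e.2.2 < c.2.2.2.2) with hq
  set s := PySem.List.sorted (l.map mk) (fun c => c.1) true with hs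
  have hnn : ∀ x ∈ s, 0 ≤ x.1 := by
    intro x hx
    rw [hs, PySem.List.mem_sorted] at hx
    obtain ⟨pr, _, rfl⟩ := List.mem_map.mp hx
    have h1 : min pr.1.1 pr.2.1 ≤ max pr.1.1 pr.2.1 := min_le_max
    have h2 : min pr.1.2 pr.2.2 ≤ max pr.1.2 pr.2.2 := min_le_max
    exact mul_nonneg (by omega) (by omega)
  have hpair : s.Pairwise (fun a b => b.1 ≤ a.1) := PySem.List.sorted_pairwise_rev _ _
  rw [show (match List.find? q s with | some c => c.1 | none => (0:Int)) = (List.find? q s).elim 0 (fun c => c.1) from by cases List.find? q s <;> rfl]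
  rw [find_desc (fun c => c.1) q s hpair hnn]
  have hA := foldA (fun pr : (Int × Int) × (Int × Int) => edges.any fun e =>
        !(decide (max e.1.1 e.2.1 ≤ min pr.1.1 pr.2.1) || decide (max pr.1.1 pr.2.1 ≤ min e.1.1 e.2.1) ||
              decide (max e.1.2 e.2.2 ≤ min pr.1.2 pr.2.2) ||
            decide (max pr.1.2 pr.2.2 ≤ min e.1.2 e.2.2)))
      (fun pr => (max pr.1.1 pr.2.1 - min pr.1.1 pr.2.1 + 1) * (max pr.1.2 pr.2.2 - min pr.1.2 pr.2.2 + 1)) l 0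
  simp only [] at hA
  rw [hA]
  have hperm : ((s.filter q).map (fun c => c.1)).Perm (((l.map mk).filter q).map (fun c => c.1)) :=
    ((PySem.List.sorted_perm (l.map mk) (fun c => c.1) true).filter q).map _
  rw [List.Perm.foldl_op_eq hperm]
  rw [List.filter_map, List.map_map]
  have hcomp : ((fun (c : Int × Int × Int × Int × Int) => c.1) ∘ mk)
      = (fun pr : (Int × Int) × (Int × Int) =>
          (max pr.1.1 pr.2.1 - min pr.1.1 pr.2.1 + 1) * (max pr.1.2 pr.2.2 - min pr.1.2 pr.2.2 + 1)) := by
    funext pr; simp [hmk]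
  have hfilt : l.filter (q ∘ mk) = l.filter (fun pr =>
      !(edges.any fun e =>
          !(decide (max e.1.1 e.2.1 ≤ min pr.1.1 pr.2.1) || decide (max pr.1.1 pr.2.1 ≤ min e.1.1 e.2.1) ||
                decide (max e.1.2 e.2.2 ≤ min pr.1.2 pr.2.2) ||
              decide (max pr.1.2 pr.2.2 ≤ min e.1.2 e.2.2)))) := by
    apply List.filter_congr
    intro pr _
    simp only [Function.comp, hq, hmk]
    have : (fun e : (Int × Int) × (Int × Int) =>
        decide (min pr.1.1 pr.2.1 < max e.1.1 e.2.1) && decide (min e.1.1 e.2.1 < max pr.1.1 pr.2.1) &&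
            decide (min pr.1.2 pr.2.2 < max e.1.2 e.2.2) &&
          decide (min e.1.2 e.2.2 < max pr.1.2 pr.2.2))
        = (fun e : (Int × Int) × (Int × Int) =>
          !(decide (max e.1.1 e.2.1 ≤ min pr.1.1 pr.2.1) || decide (max pr.1.1 pr.2.1 ≤ min e.1.1 e.2.1) ||
                decide (max e.1.2 e.2.2 ≤ min pr.1.2 pr.2.2) ||
              decide (max pr.1.2 pr.2.2 ≤ min e.1.2 e.2.2))) := by
      funext e
      simp only [Bool.not_or, ← decide_not, not_le]
    rw [this]
  rw [hcomp, hfilt]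
theorem ab_eq (points : List (Int × Int)) (hpre : points ≠ []) :
    solve_part_b points = solve_part_b_alt points := by
  obtain ⟨p0, rest, rfl⟩ : ∃ p0 rest, points = p0 :: rest := by
    cases points with
    | nil => exact absurd rfl hpre
    | cons a t => exact ⟨a, t, rfl⟩
  unfold solve_part_b solve_part_b_alt
  simp only [List.take_succ_cons, List.take_zero, List.drop_one]
  exact core _ _


-- ===== VERDICT (by name: the statement is the Claim_ definition above) =====
theorem solve_part_b_spec : Claim_equal_solve_part_b := by
  intro points _ hpre
  unfold Spec_solve_part_b
  exact ab_eq points hpre
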